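-- pv_equiv track=rewrite | github.com/LewisVille-flow/Algorithm_PS | BOJ/17140.py | col_calculate
-- ===== SOURCE A (Python) =====
-- from collections import defaultdict
--
-- def col_calculate(grid):
--     max_length = 3
--     rdict = []
--
--     for j in range(len(grid[0])):
--         ddict = defaultdict(int)
--         for i in range(len(grid)):
--             if grid[i][j] != 0:
--                 ddict[grid[i][j]] += 1
--
--             max_length = max(max_length, len(ddict)*2)
--         ddict = sorted(ddict.items(), key=lambda x:(x[1],x[0]))
--         rdict.append(ddict)
--     # new_grid = [[0 for _ in range(max_length)] for _ in range(len(grid))]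
--     new_grid = []
--
--     for i in range(len(rdict)):
--         each_col = []
--         for j in rdict[i]:
--             each_col.extend([j[0], j[1]])
--         if len(each_col) < max_length:
--             each_col.extend([0 for _ in range(max_length-len(each_col))])
--
--         new_grid.append(each_col[:100])
--
--     ##
--     new_grid = list(zip(*new_grid))
--
--     return new_grid
-- ===== SOURCE B (Python) =====
-- def _flat_col(grid, j):
--     # sort-then-scan counting: runs of the sorted nonzero column values
--     col = sorted(row[j] for row in grid if row[j] != 0)
--     pairs = []  # (count, value)
--     prev = None
--     cnt = 0
--     for v in col:
--         if v == prev: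
--             cnt += 1
--         else:
--             if prev is not None:
--                 pairs.append((cnt, prev))
--             prev, cnt = v, 1
--     if prev is not None:
--         pairs.append((cnt, prev))
--     pairs.sort()  # plain lexicographic (count, value) sort
--     return [x for c, v in pairs for x in (v, c)]
--
-- def col_calculate(grid):
--     flats = [_flat_col(grid, j) for j in range(len(grid[0]))]
--     if not flats:
--         return []
--     max_length = max(3, max(len(f) for f in flats))
--     R = min(max_length, 100)
--     return [tuple(f[i] if i < len(f) else 0 for f in flats) for i in range(R)]
-- ===== Notes on version B (the rewrite author's own statement) =====
-- stated objective: alternative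
-- what changed: B replaces A's hash-dict (defaultdict) counting by sort-then-scan run-length grouping of each column's nonzero values, sorts the (count,value) pairs with a plain lexicographic tuple sort instead of a keyed sort of dict items, and assembles the transposed output directly by index instead of A's build-rows-pad-slice-then-zip(*rows) pipeline with incremental max_length bookkeeping.
import Mathlib
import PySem

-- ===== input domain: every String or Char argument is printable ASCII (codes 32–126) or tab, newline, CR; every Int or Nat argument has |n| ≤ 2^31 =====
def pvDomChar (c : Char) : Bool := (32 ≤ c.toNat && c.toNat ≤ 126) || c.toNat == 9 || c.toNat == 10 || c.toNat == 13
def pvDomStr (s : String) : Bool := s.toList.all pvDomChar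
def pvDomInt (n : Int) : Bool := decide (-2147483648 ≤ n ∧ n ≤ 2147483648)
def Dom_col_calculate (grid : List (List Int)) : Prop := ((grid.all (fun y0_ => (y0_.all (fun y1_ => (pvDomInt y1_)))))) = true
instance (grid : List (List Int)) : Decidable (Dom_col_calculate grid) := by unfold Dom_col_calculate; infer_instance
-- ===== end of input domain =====

-- B replaces A's hash-dict counting by sort-then-scan run-length grouping of each column's
-- nonzero values, sorts the (count,value) pairs by a plain lexicographic tuple sort, and
-- assembles the transposed output directly by index instead of A's build-rows-pad-slice-
-- then-zip(*rows) pipeline with its incremental max_length bookkeeping (alternative).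

-- ===== PORT A =====
-- zip(*rows) ported by hand (exact: Python's zip stops as soon as any row is exhausted).
def pyZipStar (rows : List (List Int)) : List (List Int) :=
  if h : rows ≠ [] ∧ rows.all (fun r => !r.isEmpty) then
    (rows.map (fun r => r.headD 0)) :: pyZipStar (rows.map (fun r => r.tail))
  else []
termination_by (rows.headD []).length
decreasing_by
  obtain ⟨h1, h2⟩ := h
  cases rows with
  | nil => exact absurd rfl h1
  | cons r rs =>
    simp only [List.all_cons, Bool.and_eq_true, Bool.not_eq_eq_eq_not] at h2
    cases r with
    | nil => simp at h2
    | cons a t => simp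

def col_calculate (grid : List (List Int)) : List (List Int) :=
  -- max_length = 3; rdict = []; outer loop over columns j, inner over rows i
  let st :=
    (PySem.List.pyRange 0 ((PySem.List.pyGetD grid 0 []).length : Int) 1).foldl
      (fun (st : Int × List (List (Int × Int))) j =>
        let p :=
          (PySem.List.pyRange 0 (grid.length : Int) 1).foldl
            (fun (q : PySem.Dict Int Int × Int) i =>
              let dd := if PySem.List.pyGetD (PySem.List.pyGetD grid i []) j 0 ≠ 0 then
                  q.1.modify (PySem.List.pyGetD (PySem.List.pyGetD grid i []) j 0) 0 (· + 1)
                else q.1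
              (dd, max q.2 ((dd.size : Int) * 2)))
            (PySem.Dict.empty, st.1)
        (p.2, st.2 ++ [PySem.List.sorted2 p.1.items (fun x => x.2) (fun x => x.1)]))
      (3, [])
  let new_grid :=
    (PySem.List.pyRange 0 (st.2.length : Int) 1).foldl
      (fun ng i =>
        let each_col := (PySem.List.pyGetD st.2 i []).foldl
          (fun ec (jp : Int × Int) => ec ++ [jp.1, jp.2]) []
        let each_col := if (each_col.length : Int) < st.1 then
            each_col ++ (PySem.List.pyRange 0 (st.1 - (each_col.length : Int)) 1).map (fun _ => (0 : Int))
          else each_col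
        ng ++ [PySem.List.slice each_col none (some 100)]) []
  pyZipStar new_grid

-- ===== PORT B =====
-- _flat_col(grid, j): sort-then-scan run-length counting of one column's nonzero values
def pvFlatColB (grid : List (List Int)) (j : Int) : List Int :=
  -- col = sorted(row[j] for row in grid if row[j] != 0)
  let col := PySem.List.sorted
    ((grid.map (fun row => PySem.List.pyGetD row j 0)).filter (fun v => v ≠ 0)) (fun x => x)
  -- run-length scan of the sorted values (prev = None, cnt = 0)
  let st := col.foldl
    (fun (st : List (Int × Int) × Option Int × Int) v =>
      if some v = st.2.1 then (st.1, st.2.1, st.2.2 + 1)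
      else ((match st.2.1 with
             | some p => st.1 ++ [(st.2.2, p)]
             | none => st.1), some v, 1))
    ([], none, 0)
  let pairs := (match st.2.1 with
                | some p => st.1 ++ [(st.2.2, p)]
                | none => st.1)
  -- pairs.sort(): plain lexicographic sort of the (count, value) tuples
  let pairs := PySem.List.sorted2 pairs (fun p => p.1) (fun p => p.2)
  pairs.flatMap (fun p => [p.2, p.1])

def col_calculate_alt (grid : List (List Int)) : List (List Int) :=
  let flats := (PySem.List.pyRange 0 ((PySem.List.pyGetD grid 0 []).length : Int) 1).map
    (fun j => pvFlatColB grid j)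
  if flats = [] then []
  else
    let max_length := max 3 ((PySem.List.max? (flats.map (fun f => (f.length : Int))) (fun x => x)).getD 0)
    let R := min max_length 100
    (PySem.List.pyRange 0 R 1).map (fun i =>
      flats.map (fun f => if i < (f.length : Int) then PySem.List.pyGetD f i 0 else 0))

-- ===== PRECONDITION & SPEC =====
-- Pre_ excludes exactly the inputs where the Python A raises IndexError: the empty grid
-- (grid[0]) and ragged grids with some row shorter than the first row (grid[i][j]).
def Pre_col_calculate (grid : List (List Int)) : Prop :=
  (!grid.isEmpty && grid.all (fun row => Nat.ble (grid.headD []).length row.length)) = true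
instance (grid : List (List Int)) : Decidable (Pre_col_calculate grid) := by
  unfold Pre_col_calculate; infer_instance
def pvWitness_col_calculate : List (List Int) := [[1, 2], [0, 1]]

def Spec_col_calculate (grid : List (List Int)) (out : List (List Int)) : Prop := out = col_calculate_alt grid
instance (grid : List (List Int)) (out : List (List Int)) : Decidable (Spec_col_calculate grid out) := by unfold Spec_col_calculate; infer_instance

-- ===== CLAIM (what is proved, stated in full; the proofs are below) =====
def Claim_equal_col_calculate : Prop := ∀ (grid : List (List Int)), Dom_col_calculate grid → Pre_col_calculate grid → Spec_col_calculate grid (col_calculate grid)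

-- ===== LEMMAS AND PROOFS =====

-- ---- A-side vocabulary (counting dict per column) ----
def pvStep (d : PySem.Dict Int Int) (v : Int) : PySem.Dict Int Int :=
  if v ≠ 0 then d.modify v 0 (· + 1) else d

def pvDictOf (vs : List Int) (d : PySem.Dict Int Int) : PySem.Dict Int Int :=
  vs.foldl pvStep d

def pvPairStep (q : PySem.Dict Int Int × Int) (v : Int) : PySem.Dict Int Int × Int :=
  (pvStep q.1 v, max q.2 (((pvStep q.1 v).size : Int) * 2))

def pvColVals (grid : List (List Int)) (j : Int) : List Int :=
  grid.map (fun row => PySem.List.pyGetD row j 0)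

def pvSortedItems (d : PySem.Dict Int Int) : List (Int × Int) :=
  PySem.List.sorted2 d.items (fun x => x.2) (fun x => x.1)

def pvFlatOf (d : PySem.Dict Int Int) : List Int :=
  (pvSortedItems d).foldl (fun f p => f ++ [p.1, p.2]) []

def pvD (grid : List (List Int)) (j : Int) : PySem.Dict Int Int :=
  pvDictOf (pvColVals grid j) PySem.Dict.empty

def pvFlat (grid : List (List Int)) (j : Int) : List Int := pvFlatOf (pvD grid j)

def pvJs (grid : List (List Int)) : List Int :=
  PySem.List.pyRange 0 ((PySem.List.pyGetD grid 0 []).length : Int) 1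

def pvML (grid : List (List Int)) : Int :=
  (pvJs grid).foldl (fun m j => max m (((pvD grid j).size : Int) * 2)) 3

-- A's padded, sliced output row for one column
def pvRow (ML : Int) (f : List Int) : List Int :=
  PySem.List.slice
    (if (f.length : Int) < ML then
      f ++ (PySem.List.pyRange 0 (ML - (f.length : Int)) 1).map (fun _ => (0 : Int))
    else f) none (some 100)

theorem pv_dictOf_filter (vs : List Int) (d : PySem.Dict Int Int) :
    (vs.filter (fun v => v ≠ 0)).foldl (fun d v => d.modify v 0 (· + 1)) d = pvDictOf vs d := by
  induction vs generalizing d with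
  | nil => rfl
  | cons v vs ih =>
    by_cases h : v = 0
    · simpa [pvDictOf, List.filter_cons, h, pvStep] using ih d
    · simpa [pvDictOf, List.filter_cons, h, pvStep] using ih (d.modify v 0 (· + 1))

theorem pv_size_le_modify (d : PySem.Dict Int Int) (k : Int) (f : Int → Int) :
    d.size ≤ (d.modify k 0 f).size := by
  have hs : ∀ e : PySem.Dict Int Int, e.size = e.keys.length := by
    intro e; simp [PySem.Dict.keys, PySem.Dict.size]
  rw [hs, hs, PySem.Dict.keys_modify]
  by_cases hc : d.contains k
  · rw [PySem.Dict.keys_insert_of_contains _ _ hc]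
  · rw [PySem.Dict.keys_insert_of_not_contains _ _ (by simpa using hc)]
    simp

theorem pv_size_le_dictOf (vs : List Int) (d : PySem.Dict Int Int) :
    d.size ≤ (pvDictOf vs d).size := by
  induction vs generalizing d with
  | nil => exact le_refl _
  | cons v vs ih =>
    have h1 : pvDictOf (v :: vs) d = pvDictOf vs (pvStep d v) := rfl
    rw [h1]
    refine le_trans ?_ (ih (pvStep d v))
    unfold pvStep
    split
    · exact pv_size_le_modify d v _
    · exact le_refl _

-- the inner counting loop of A: final dict plus running max of 2*size
theorem pv_inner_fold (vs : List Int) (d : PySem.Dict Int Int) (m : Int)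
    (hm : (d.size : Int) * 2 ≤ m) :
    vs.foldl pvPairStep (d, m)
      = (pvDictOf vs d, max m (((pvDictOf vs d).size : Int) * 2)) := by
  induction vs generalizing d m with
  | nil =>
    have h0 : pvDictOf [] d = d := rfl
    rw [List.foldl_nil, h0, max_eq_left hm]
  | cons v vs ih =>
    have h1 : pvDictOf (v :: vs) d = pvDictOf vs (pvStep d v) := rfl
    have h2 : List.foldl pvPairStep (d, m) (v :: vs)
        = List.foldl pvPairStep (pvStep d v, max m (((pvStep d v).size : Int) * 2)) vs := rfl
    rw [h1, h2, ih (pvStep d v) _ (le_max_right _ _)]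
    have hmono := pv_size_le_dictOf vs (pvStep d v)
    have h3 : max (max m (((pvStep d v).size : Int) * 2)) (((pvDictOf vs (pvStep d v)).size : Int) * 2)
        = max m (((pvDictOf vs (pvStep d v)).size : Int) * 2) := by omega
    rw [h3]

-- the inner counting loop, in the index-driven form the port uses
theorem pv_inner_clean (grid : List (List Int)) (j m' : Int) (hm' : 0 ≤ m') :
    List.foldl (fun (q : PySem.Dict Int Int × Int) i =>
        pvPairStep q (PySem.List.pyGetD (PySem.List.pyGetD grid i []) j 0))
        (PySem.Dict.empty, m') (PySem.List.pyRange 0 (grid.length : Int) 1)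
      = (pvD grid j, max m' (((pvD grid j).size : Int) * 2)) := by
  rw [PySem.List.foldl_pyRange_zero_pyGetD' grid []
        (fun q row => pvPairStep q (PySem.List.pyGetD row j 0)) (PySem.Dict.empty, m')]
  have hmap : List.foldl (fun q row => pvPairStep q (PySem.List.pyGetD row j 0))
          (PySem.Dict.empty, m') grid
      = List.foldl pvPairStep (PySem.Dict.empty, m') (pvColVals grid j) :=
    (List.foldl_map (f := fun row => PySem.List.pyGetD row j 0)
      (g := pvPairStep) (l := grid) (init := (PySem.Dict.empty, m'))).symm
  rw [hmap, pv_inner_fold _ _ _ (by simpa using hm')]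
  rfl

-- the outer loop of A over the column indices
theorem pv_outer_fold (grid : List (List Int)) (js : List Int) (m : Int)
    (acc : List (List (Int × Int))) (hm : 0 ≤ m) :
    js.foldl (fun (st : Int × List (List (Int × Int))) j =>
        ((List.foldl (fun (q : PySem.Dict Int Int × Int) i =>
            pvPairStep q (PySem.List.pyGetD (PySem.List.pyGetD grid i []) j 0))
            (PySem.Dict.empty, st.1) (PySem.List.pyRange 0 (grid.length : Int) 1)).2,
         st.2 ++ [pvSortedItems (List.foldl (fun (q : PySem.Dict Int Int × Int) i =>
            pvPairStep q (PySem.List.pyGetD (PySem.List.pyGetD grid i []) j 0))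
            (PySem.Dict.empty, st.1) (PySem.List.pyRange 0 (grid.length : Int) 1)).1])) (m, acc)
      = (js.foldl (fun m j => max m (((pvD grid j).size : Int) * 2)) m,
         acc ++ js.map (fun j => pvSortedItems (pvD grid j))) := by
  induction js generalizing m acc with
  | nil => simp
  | cons j js ih =>
    simp only [List.foldl_cons, List.map_cons]
    rw [pv_inner_clean grid j m hm]
    rw [ih _ _ (by omega)]
    simp

-- A's second loop: build each padded, sliced row
theorem pv_loop2 (rd : List (List (Int × Int))) (ML : Int) :
    (PySem.List.pyRange 0 (rd.length : Int) 1).foldl (fun ng i =>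
        ng ++ [pvRow ML ((PySem.List.pyGetD rd i []).foldl
          (fun ec (jp : Int × Int) => ec ++ [jp.1, jp.2]) [])]) []
      = rd.map (fun r => pvRow ML (r.foldl (fun ec (jp : Int × Int) => ec ++ [jp.1, jp.2]) [])) := by
  rw [PySem.List.foldl_pyRange_zero_pyGetD' rd []
        (fun ng r => ng ++ [pvRow ML (r.foldl (fun ec (jp : Int × Int) => ec ++ [jp.1, jp.2]) [])]) []]
  rw [PySem.List.foldl_append_singleton_eq_map]
  simp

theorem pv_flatten_len (l : List (Int × Int)) (acc : List Int) :
    (l.foldl (fun f p => f ++ [p.1, p.2]) acc).length = acc.length + 2 * l.length := by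
  induction l generalizing acc with
  | nil => simp
  | cons p l ih =>
    rw [List.foldl_cons, ih]
    simp
    omega

theorem pv_flat_len (d : PySem.Dict Int Int) : (pvFlatOf d).length = 2 * d.size := by
  unfold pvFlatOf
  rw [pv_flatten_len]
  have := (PySem.List.sorted2_perm d.items (fun x => x.2) (fun x => x.1) false).length_eq
  simp only [List.length_nil, Nat.zero_add, pvSortedItems]
  rw [this]
  rfl

-- pad list is a replicate of zeros
theorem pv_pad_eq (n : Int) :
    (PySem.List.pyRange 0 n 1).map (fun _ => (0 : Int)) = List.replicate n.toNat 0 := by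
  rw [List.map_const', PySem.List.length_pyRange_one]
  norm_num

theorem pvRow_length (ML : Int) (f : List Int) (h : (f.length : Int) ≤ ML) :
    (pvRow ML f).length = min ML.toNat 100 := by
  unfold pvRow
  rw [PySem.List.slice_to _ (by norm_num)]
  split_ifs with hlt
  · rw [pv_pad_eq]
    simp only [List.length_take, List.length_append, List.length_replicate]
    omega
  · simp only [List.length_take]
    omega

theorem pvRow_getD (ML : Int) (f : List Int) (h : (f.length : Int) ≤ ML)
    (i : ℕ) (hi : i < min ML.toNat 100) :
    (pvRow ML f).getD i 0 = if (i : Int) < (f.length : Int) then f.getD i 0 else 0 := by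
  unfold pvRow
  rw [PySem.List.slice_to _ (by norm_num)]
  rw [List.getD_eq_getElem?_getD, List.getElem?_take, if_pos (by omega)]
  by_cases hil : (i : Int) < (f.length : Int)
  · rw [if_pos hil]
    split_ifs with hlt
    · rw [List.getElem?_append_left (by omega)]
      exact (List.getD_eq_getElem?_getD).symm
    · exact (List.getD_eq_getElem?_getD).symm
  · rw [if_neg hil]
    rw [if_pos (by omega), pv_pad_eq]
    rw [List.getElem?_append_right (by omega), List.getElem?_replicate, if_pos (by omega)]
    rfl

theorem pv_headD_getD (l : List Int) : l.headD 0 = l.getD 0 0 := by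
  cases l <;> rfl

theorem pv_getD_tail (l : List Int) (i : ℕ) : l.getD (i + 1) 0 = l.tail.getD i 0 := by
  cases l <;> simp [List.getD]

-- zip(*rows) on rows of one common length is the indexed transpose
theorem pv_zipStar_eq (n : ℕ) (rows : List (List Int)) (hne : rows ≠ [])
    (hlen : ∀ r ∈ rows, r.length = n) :
    pyZipStar rows = (List.range n).map (fun i => rows.map (fun r => r.getD i 0)) := by
  induction n generalizing rows with
  | zero =>
    rw [pyZipStar]
    rw [dif_neg]
    · simp
    · intro hcon
      obtain ⟨r, hr⟩ := List.exists_mem_of_ne_nil rows hne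
      have := hlen r hr
      have h2 := hcon.2
      rw [List.all_eq_true] at h2
      have := h2 r hr
      simp [List.length_eq_zero_iff.mp (hlen r hr)] at this
  | succ n ih =>
    have hall : rows.all (fun r => !r.isEmpty) = true := by
      rw [List.all_eq_true]
      intro r hr
      have := hlen r hr
      simp
      intro hE
      rw [hE] at this
      simp at this
    rw [pyZipStar, dif_pos ⟨hne, hall⟩]
    rw [ih (rows.map (fun r => r.tail)) (by simpa using hne) ?htail]
    case htail =>
      intro r' hr'
      obtain ⟨r, hr, rfl⟩ := List.mem_map.mp hr'
      have := hlen r hr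
      simp [List.length_tail]
      omega
    rw [List.range_succ_eq_map, List.map_cons, List.map_map]
    congr 1
    · exact List.map_congr_left (fun r _ => pv_headD_getD r)
    · apply List.map_congr_left
      intro i _
      simp only [Function.comp]
      rw [List.map_map]
      apply List.map_congr_left
      intro r _
      simp only [Function.comp]
      exact (pv_getD_tail r i).symm

-- A's result in closed form
theorem pv_A_eq (grid : List (List Int)) :
    col_calculate grid
      = pyZipStar ((pvJs grid).map (fun j => pvRow (pvML grid) (pvFlat grid j))) := by
  show pyZipStar
      ((PySem.List.pyRange 0 ((((pvJs grid).foldl (fun (st : Int × List (List (Int × Int))) j =>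
        ((List.foldl (fun (q : PySem.Dict Int Int × Int) i =>
            pvPairStep q (PySem.List.pyGetD (PySem.List.pyGetD grid i []) j 0))
            (PySem.Dict.empty, st.1) (PySem.List.pyRange 0 (grid.length : Int) 1)).2,
         st.2 ++ [pvSortedItems (List.foldl (fun (q : PySem.Dict Int Int × Int) i =>
            pvPairStep q (PySem.List.pyGetD (PySem.List.pyGetD grid i []) j 0))
            (PySem.Dict.empty, st.1) (PySem.List.pyRange 0 (grid.length : Int) 1)).1]))
        (3, [])).2.length : Int)) 1).foldl (fun ng i =>
        ng ++ [pvRow ((pvJs grid).foldl (fun (st : Int × List (List (Int × Int))) j =>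
        ((List.foldl (fun (q : PySem.Dict Int Int × Int) i =>
            pvPairStep q (PySem.List.pyGetD (PySem.List.pyGetD grid i []) j 0))
            (PySem.Dict.empty, st.1) (PySem.List.pyRange 0 (grid.length : Int) 1)).2,
         st.2 ++ [pvSortedItems (List.foldl (fun (q : PySem.Dict Int Int × Int) i =>
            pvPairStep q (PySem.List.pyGetD (PySem.List.pyGetD grid i []) j 0))
            (PySem.Dict.empty, st.1) (PySem.List.pyRange 0 (grid.length : Int) 1)).1]))
        (3, [])).1
          ((PySem.List.pyGetD ((pvJs grid).foldl (fun (st : Int × List (List (Int × Int))) j =>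
        ((List.foldl (fun (q : PySem.Dict Int Int × Int) i =>
            pvPairStep q (PySem.List.pyGetD (PySem.List.pyGetD grid i []) j 0))
            (PySem.Dict.empty, st.1) (PySem.List.pyRange 0 (grid.length : Int) 1)).2,
         st.2 ++ [pvSortedItems (List.foldl (fun (q : PySem.Dict Int Int × Int) i =>
            pvPairStep q (PySem.List.pyGetD (PySem.List.pyGetD grid i []) j 0))
            (PySem.Dict.empty, st.1) (PySem.List.pyRange 0 (grid.length : Int) 1)).1]))
        (3, [])).2 i []).foldl
          (fun ec (jp : Int × Int) => ec ++ [jp.1, jp.2]) [])]) [])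
    = pyZipStar ((pvJs grid).map (fun j => pvRow (pvML grid) (pvFlat grid j)))
  rw [pv_outer_fold grid (pvJs grid) 3 [] (by norm_num)]
  rw [pv_loop2]
  simp only [List.nil_append, List.map_map]
  rfl

-- ---- B-side vocabulary: run-length grouping of a sorted list ----
def pvStepB (st : List (Int × Int) × Option Int × Int) (v : Int) :
    List (Int × Int) × Option Int × Int :=
  if some v = st.2.1 then (st.1, st.2.1, st.2.2 + 1)
  else ((match st.2.1 with
         | some p => st.1 ++ [(st.2.2, p)]
         | none => st.1), some v, 1)

def pvEmitB (st : List (Int × Int) × Option Int × Int) : List (Int × Int) :=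
  match st.2.1 with
  | some p => st.1 ++ [(st.2.2, p)]
  | none => st.1

def pvRunsAux (p : Int) (c : Int) : List Int → List (Int × Int)
  | [] => [(c, p)]
  | v :: t => if v = p then pvRunsAux p (c + 1) t else (c, p) :: pvRunsAux v 1 t

def pvRuns : List Int → List (Int × Int)
  | [] => []
  | v :: t => pvRunsAux v 1 t

def pvVs (grid : List (List Int)) (j : Int) : List Int :=
  (pvColVals grid j).filter (fun v => v ≠ 0)

-- the scan loop computes the runs
theorem pv_fold_runsAux (l : List Int) (pairs : List (Int × Int)) (p c : Int) :
    pvEmitB (l.foldl pvStepB (pairs, some p, c)) = pairs ++ pvRunsAux p c l := by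
  induction l generalizing pairs p c with
  | nil => simp [pvEmitB, pvRunsAux]
  | cons v t ih =>
    by_cases h : v = p
    · subst h
      rw [List.foldl_cons]
      have hstep : pvStepB (pairs, some v, c) v = (pairs, some v, c + 1) := by
        simp [pvStepB]
      rw [hstep, ih, pvRunsAux, if_pos rfl]
    · rw [List.foldl_cons]
      have hstep : pvStepB (pairs, some p, c) v = (pairs ++ [(c, p)], some v, 1) := by
        simp [pvStepB, h]
      rw [hstep, ih, pvRunsAux, if_neg h]
      simp

theorem pv_fold_runs (l : List Int) :
    pvEmitB (l.foldl pvStepB ([], none, 0)) = pvRuns l := by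
  cases l with
  | nil => rfl
  | cons v t =>
    rw [List.foldl_cons]
    have hstep : pvStepB ([], none, 0) v = ([], some v, 1) := by simp [pvStepB]
    rw [hstep, pv_fold_runsAux]
    rfl

-- on a sorted tail bounded below by p, the runs peel off p's run first
theorem pv_runsAux_sorted (l : List Int) (p c : Int)
    (hpw : l.Pairwise (· ≤ ·)) (hlb : ∀ x ∈ l, p ≤ x) :
    pvRunsAux p c l = (c + (l.count p : Int), p) :: pvRuns (l.filter (· ≠ p)) := by
  induction l generalizing p c with
  | nil => simp [pvRunsAux, pvRuns]
  | cons v t ih =>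
    rw [List.pairwise_cons] at hpw
    by_cases h : v = p
    · subst h
      rw [pvRunsAux, if_pos rfl, ih v (c + 1) hpw.2 hpw.1]
      have hcnt : ((v :: t).count v : Int) = (t.count v : Int) + 1 := by
        rw [List.count_cons_self]; push_cast; ring
      have hfil : (v :: t).filter (· ≠ v) = t.filter (· ≠ v) := by
        simp
      rw [hcnt, hfil]
      ring_nf
    · have hlt : p < v := lt_of_le_of_ne (hlb v (List.mem_cons_self)) (Ne.symm h)
      have hnm : p ∉ v :: t := by
        intro hm
        rcases List.mem_cons.mp hm with h1 | h1
        · exact h h1.symm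
        · exact absurd (hpw.1 p h1) (by omega)
      have hcnt : (v :: t).count p = 0 := List.count_eq_zero.mpr hnm
      have hfil : (v :: t).filter (· ≠ p) = v :: t := by
        rw [List.filter_eq_self]
        intro a ha
        simp only [ne_eq, decide_eq_true_eq]
        intro hap
        exact hnm (hap ▸ ha)
      rw [pvRunsAux, if_neg h, hcnt, hfil]
      simp [pvRuns]

theorem pv_runs_cons (v : Int) (t : List Int) (hpw : (v :: t).Pairwise (· ≤ ·)) :
    pvRuns (v :: t) = ((((v :: t).count v : ℕ) : Int), v) :: pvRuns ((v :: t).filter (· ≠ v)) := by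
  rw [List.pairwise_cons] at hpw
  have := pv_runsAux_sorted t v 1 hpw.2 hpw.1
  rw [pvRuns, this]
  have hcnt : (1 : Int) + (t.count v : Int) = (((v :: t).count v : ℕ) : Int) := by
    rw [List.count_cons_self]; push_cast; ring
  have hfil : t.filter (· ≠ v) = (v :: t).filter (· ≠ v) := by
    simp
  rw [hcnt, hfil]

-- the three facts about the runs of a sorted list, by strong induction on the length
theorem pv_runs_spec (n : ℕ) : ∀ (l : List Int), l.length ≤ n → l.Pairwise (· ≤ ·) →
    ((pvRuns l).map (·.2)).Nodup ∧ (∀ v, v ∈ (pvRuns l).map (·.2) ↔ v ∈ l) ∧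
    (∀ pr ∈ pvRuns l, pr = ((l.count pr.2 : Int), pr.2)) := by
  induction n with
  | zero =>
    intro l hl _
    have : l = [] := List.length_eq_zero_iff.mp (Nat.le_zero.mp hl)
    subst this
    simp [pvRuns]
  | succ n ih =>
    intro l hl hpw
    cases l with
    | nil => simp [pvRuns]
    | cons v t =>
      have hpw' := hpw
      rw [List.pairwise_cons] at hpw'
      set l' := (v :: t).filter (· ≠ v) with hl'
      have hl'sub : l' = t.filter (· ≠ v) := by simp [hl']
      have hlen' : l'.length ≤ n := by
        rw [hl'sub]
        have := List.length_filter_le (fun x => decide (x ≠ v)) t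
        simp only [List.length_cons] at hl
        omega
      have hpw'' : l'.Pairwise (· ≤ ·) := List.Pairwise.sublist List.filter_sublist hpw
      obtain ⟨ihn, ihm, ihp⟩ := ih l' hlen' hpw''
      have hmeml' : ∀ x, x ∈ l' ↔ x ∈ v :: t ∧ x ≠ v := by
        intro x
        rw [hl', List.mem_filter]
        simp
      rw [pv_runs_cons v t hpw]
      refine ⟨?_, ?_, ?_⟩
      · rw [List.map_cons]
        refine List.nodup_cons.mpr ⟨?_, ihn⟩
        intro hm
        have := (ihm v).mp hm
        exact ((hmeml' v).mp this).2 rfl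
      · intro x
        rw [List.map_cons, List.mem_cons]
        constructor
        · rintro (rfl | hx)
          · exact List.mem_cons_self
          · exact ((hmeml' x).mp ((ihm x).mp hx)).1
        · intro hx
          by_cases hxv : x = v
          · exact Or.inl hxv
          · exact Or.inr ((ihm x).mpr ((hmeml' x).mpr ⟨hx, hxv⟩))
      · intro pr hpr
        rcases List.mem_cons.mp hpr with rfl | hpr'
        · rfl
        · have heq := ihp pr hpr'
          have hkey : pr.2 ∈ l' := by
            have : pr.2 ∈ (pvRuns l').map (·.2) := List.mem_map.mpr ⟨pr, hpr', rfl⟩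
            exact (ihm pr.2).mp this
          have hne : pr.2 ≠ v := ((hmeml' pr.2).mp hkey).2
          have hcnt : l'.count pr.2 = (v :: t).count pr.2 := by
            rw [hl'sub, List.count_filter (by simp [hne])]
            exact (List.count_cons_of_ne hne.symm).symm
          rw [heq, hcnt]

-- sorted2 with Int keys is sorted with the lexicographic key
theorem pv_sorted2_eq_sorted_lex {α : Type} (xs : List α) (k1 k2 : α → Int) :
    PySem.List.sorted2 xs k1 k2 false
      = PySem.List.sorted xs (fun x => toLex (k1 x, k2 x)) false := by
  have hb : (fun a b => decide (k1 a < k1 b) || (!decide (k1 b < k1 a) && decide (k2 a < k2 b)))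
      = (fun a b => decide ((toLex (k1 a, k2 a) : Lex (Int × Int)) < toLex (k1 b, k2 b))) := by
    funext a b
    rw [Bool.eq_iff_iff]
    simp [Prod.Lex.lt_iff]
    omega
  show xs.foldl (fun acc x => PySem.List.insertBy _ x acc) []
      = xs.foldl (fun acc x => PySem.List.insertBy _ x acc) []
  rw [hb]

-- B's per-column flat list equals A's (flattened sorted counter items)
theorem pv_flatB_eq (grid : List (List Int)) (j : Int) :
    pvFlatColB grid j = pvFlat grid j := by
  show (PySem.List.sorted2
      (pvEmitB ((PySem.List.sorted (pvVs grid j) (fun x => x)).foldl pvStepB ([], none, 0)))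
      (fun p => p.1) (fun p => p.2)).flatMap (fun p => [p.2, p.1])
    = pvFlat grid j
  set vs := pvVs grid j with hvs
  set sc := PySem.List.sorted vs (fun x => x) false with hsc
  have hscpw : sc.Pairwise (· ≤ ·) := PySem.List.sorted_pairwise vs (fun x => x)
  have hscperm : sc.Perm vs := PySem.List.sorted_perm vs (fun x => x) false
  obtain ⟨hnodup, hmem, hpair⟩ := pv_runs_spec sc.length sc (le_refl _) hscpw
  -- the scan result is the runs of sc
  rw [pv_fold_runs]
  set pairsB := pvRuns sc with hpairsB
  -- pairsB as a map over its (nodup) key list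
  set KB := pairsB.map (·.2) with hKB
  have hpairsB_eq : pairsB = KB.map (fun v => ((vs.count v : Int), v)) := by
    rw [hKB, List.map_map]
    have : ∀ pr ∈ pairsB, ((fun v => ((vs.count v : Int), v)) ∘ (·.2)) pr = pr := by
      intro pr hpr
      have h1 := hpair pr hpr
      have h2 : sc.count pr.2 = vs.count pr.2 := hscperm.count_eq pr.2
      simp only [Function.comp]
      rw [← h2, ← h1]
    rw [List.map_congr_left this]
    simp
  -- A's counter dict and its items
  have hD : pvD grid j = PySem.Dict.counter vs := by
    rw [PySem.Dict.counter_eq_foldl, hvs, pvVs, pv_dictOf_filter]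
    rfl
  have hitems : (pvD grid j).items
      = (PySem.Set.ofList vs).map (fun k => (k, (vs.count k : Int))) := by
    rw [hD, PySem.Dict.items_counter]
  -- the two pair lists are permutations (up to swapping components)
  have hKperm : KB.Perm (PySem.Set.ofList vs) := by
    rw [List.perm_ext_iff_of_nodup hnodup (PySem.Set.nodup_ofList vs)]
    intro a
    rw [hKB, hmem a, PySem.Set.mem_ofList]
    exact hscperm.mem_iff
  have hperm : pairsB.Perm ((pvD grid j).items.map Prod.swap) := by
    rw [hitems, List.map_map]
    have hswap : (Prod.swap ∘ fun k => (k, (vs.count k : Int)))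
        = fun v => ((vs.count v : Int), v) := rfl
    rw [hswap, hpairsB_eq]
    exact hKperm.map _
  -- both sides sorted by the same strict lexicographic key
  rw [pv_sorted2_eq_sorted_lex]
  have hA : pvFlat grid j
      = (PySem.List.sorted ((pvD grid j).items) (fun x => toLex (x.2, x.1)) false).flatMap
          (fun p => [p.1, p.2]) := by
    rw [pvFlat, pvFlatOf, PySem.List.foldl_append_eq_flatMap, List.nil_append, pvSortedItems,
      pv_sorted2_eq_sorted_lex]
  rw [hA]
  have hkey : PySem.List.sorted pairsB (fun x : Int × Int => toLex (x.1, x.2)) false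
      = (PySem.List.sorted ((pvD grid j).items) (fun x : Int × Int => toLex (x.2, x.1)) false).map
          Prod.swap := by
    apply PySem.List.eq_of_perm_of_pairwise_le_of_injective
      (key := fun p : Int × Int => (toLex p : Lex (Int × Int))) toLex.injective
    · exact ((PySem.List.sorted_perm pairsB _ false).trans hperm).trans
        ((PySem.List.sorted_perm ((pvD grid j).items) _ false).map Prod.swap).symm
    · exact PySem.List.sorted_pairwise pairsB (fun x : Int × Int => toLex (x.1, x.2))
    · rw [List.pairwise_map]
      exact PySem.List.sorted_pairwise ((pvD grid j).items) (fun x : Int × Int => toLex (x.2, x.1))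
  rw [hkey, List.flatMap_map]
  rfl

-- B's result in the flats/transpose vocabulary
theorem pv_B_eq (grid : List (List Int)) :
    col_calculate_alt grid
      = (if (pvJs grid).map (fun j => pvFlat grid j) = [] then []
         else
          (PySem.List.pyRange 0
            (min (max 3 ((PySem.List.max? (((pvJs grid).map (fun j => pvFlat grid j)).map
              (fun f => (f.length : Int))) (fun x => x)).getD 0)) 100) 1).map (fun i =>
            ((pvJs grid).map (fun j => pvFlat grid j)).map
              (fun f => if i < (f.length : Int) then PySem.List.pyGetD f i 0 else 0))) := by
  have hflat' : (fun (j : Int) => pvFlatColB grid j) = fun (j : Int) => pvFlat grid j :=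
    funext (pv_flatB_eq grid)
  simp only [col_calculate_alt, hflat']
  rfl

theorem pv_foldl_max_proj (xs : List Int) (L : Int → Int) (a b : Int) :
    xs.foldl (fun m j => max m (L j)) (max a b) = max a (xs.foldl (fun m j => max m (L j)) b) := by
  induction xs generalizing b with
  | nil => simp
  | cons x xs ih =>
    rw [List.foldl_cons, List.foldl_cons, max_assoc, ih]

theorem pv_ML_bound (grid : List (List Int)) :
    3 ≤ pvML grid ∧ ∀ j ∈ pvJs grid, ((pvFlat grid j).length : Int) ≤ pvML grid := by
  have hbounds := PySem.List.le_foldl_max_int (pvJs grid)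
    (fun j => ((pvD grid j).size : Int) * 2) 3
  refine ⟨hbounds.1, fun j hj => ?_⟩
  have h1 := hbounds.2 j hj
  have h2 : (pvFlat grid j).length = 2 * (pvD grid j).size := pv_flat_len (pvD grid j)
  simp only at h1
  unfold pvML
  omega

theorem pv_ML_maxB (grid : List (List Int)) (hne : pvJs grid ≠ []) :
    pvML grid = max 3 ((PySem.List.max? (((pvJs grid).map (fun j => pvFlat grid j)).map
      (fun f => (f.length : Int))) (fun x => x)).getD 0) := by
  have hstep : (fun (m : Int) (j : Int) => max m (((pvD grid j).size : Int) * 2))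
      = fun m j => max m (((pvFlat grid j).length : Int)) := by
    funext m j
    have h2 : (pvFlat grid j).length = 2 * (pvD grid j).size := pv_flat_len (pvD grid j)
    have h3 : ((pvD grid j).size : Int) * 2 = ((pvFlat grid j).length : Int) := by omega
    rw [h3]
  unfold pvML
  rw [hstep]
  cases hjs2 : pvJs grid with
  | nil => exact absurd hjs2 hne
  | cons j0 rest =>
    rw [List.map_map]
    have hcomp : ((fun f => (f.length : Int)) ∘ fun j => pvFlat grid j)
        = fun j => ((pvFlat grid j).length : Int) := rfl
    rw [hcomp, List.map_cons, PySem.List.max?_id_cons, Option.getD_some, List.foldl_map,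
      List.foldl_cons]
    exact pv_foldl_max_proj rest (fun j => ((pvFlat grid j).length : Int)) 3 _

theorem pv_main (grid : List (List Int)) : col_calculate grid = col_calculate_alt grid := by
  rw [pv_A_eq, pv_B_eq]
  by_cases hjs : pvJs grid = []
  · rw [hjs]
    simp only [List.map_nil]
    rw [pyZipStar]
    simp
  · rw [if_neg (by simpa using hjs)]
    have h3 := (pv_ML_bound grid).1
    have hb := (pv_ML_bound grid).2
    rw [← pv_ML_maxB grid hjs]
    have hrowlen : ∀ r ∈ (pvJs grid).map (fun j => pvRow (pvML grid) (pvFlat grid j)),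
        r.length = min (pvML grid).toNat 100 := by
      intro r hr
      obtain ⟨j, hj, rfl⟩ := List.mem_map.mp hr
      exact pvRow_length _ _ (hb j hj)
    rw [pv_zipStar_eq (min (pvML grid).toNat 100) _ (by simpa using hjs) hrowlen]
    have hR : PySem.List.pyRange 0 (min (pvML grid) 100) 1
        = (List.range (min (pvML grid).toNat 100)).map (fun (k : ℕ) => (k : Int)) := by
      rw [PySem.List.pyRange_one]
      have hnn : (min (pvML grid) 100 - 0).toNat = min (pvML grid).toNat 100 := by omega
      rw [hnn]
      exact List.map_congr_left (fun k _ => by omega)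
    rw [hR, List.map_map]
    apply List.map_congr_left
    intro i hi
    have hi' : i < min (pvML grid).toNat 100 := List.mem_range.mp hi
    simp only [Function.comp, List.map_map]
    apply List.map_congr_left
    intro j hj
    simp only [Function.comp]
    rw [pvRow_getD _ _ (hb j hj) i hi']
    split_ifs with hc
    · simp
    · rfl

-- ===== VERDICT (by name: the statement is the Claim_ definition above) =====
theorem col_calculate_spec : Claim_equal_col_calculate := by
  intro grid _ _
  exact pv_main grid
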